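-- pv_equiv track=rewrite | github.com/AayushGoel08/trip-plan-server | ilp2.py | makeroute
-- ===== SOURCE A (Python) =====
-- from operator import itemgetter
--
-- def makeroute(numdays,places,times,staytimeplaces):
--     routeString = []
--     routeTimes = []
--     coll = []
--     for i in range(0,numdays):
--         routeString.append("Home-")
--         routeTimes.append("Home-")
--     for i in range(0, len(places)):
--         coll.append((places[i], times[i], staytimeplaces[i]))
--     coll = sorted(coll,key=itemgetter(1))
--     for i in range(0, len(coll)):
--         ind = int(coll[i][1]//1440)
--         routeString[ind] = routeString[ind]+str(coll[i][0])+"-"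
--         routeTimes[ind] = routeTimes[ind]+str(coll[i][1])+"-"
--     for i in range(0,len(routeString)):
--         routeString[i] = routeString[i]+ "Home"
--         routeTimes[i] = routeTimes[i]+ "Home"
--     return [routeString,routeTimes]
-- ===== SOURCE B (Python) =====
-- def makeroute(numdays, places, times, staytimeplaces):
--     days = []
--     for _ in range(0, numdays):
--         days.append([])
--     for i in range(0, len(places)):
--         entry = (places[i], times[i], staytimeplaces[i])
--         days[int(times[i] // 1440)].append(entry)
--     routeString = []
--     routeTimes = []
--     for bucket in days:
--         bucket = sorted(bucket, key=lambda e: e[1])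
--         s = "Home-"
--         t = "Home-"
--         for p, tm, st in bucket:
--             s += str(p) + "-"
--             t += str(tm) + "-"
--         routeString.append(s + "Home")
--         routeTimes.append(t + "Home")
--     return [routeString, routeTimes]
-- ===== Notes on version B (the rewrite author's own statement) =====
-- stated objective: alternative
-- what changed: B partitions places into per-day buckets first and stably sorts each bucket separately, building each day's strings independently, instead of A's single global sort followed by interleaved index assignments into two route arrays.
import Mathlib
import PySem

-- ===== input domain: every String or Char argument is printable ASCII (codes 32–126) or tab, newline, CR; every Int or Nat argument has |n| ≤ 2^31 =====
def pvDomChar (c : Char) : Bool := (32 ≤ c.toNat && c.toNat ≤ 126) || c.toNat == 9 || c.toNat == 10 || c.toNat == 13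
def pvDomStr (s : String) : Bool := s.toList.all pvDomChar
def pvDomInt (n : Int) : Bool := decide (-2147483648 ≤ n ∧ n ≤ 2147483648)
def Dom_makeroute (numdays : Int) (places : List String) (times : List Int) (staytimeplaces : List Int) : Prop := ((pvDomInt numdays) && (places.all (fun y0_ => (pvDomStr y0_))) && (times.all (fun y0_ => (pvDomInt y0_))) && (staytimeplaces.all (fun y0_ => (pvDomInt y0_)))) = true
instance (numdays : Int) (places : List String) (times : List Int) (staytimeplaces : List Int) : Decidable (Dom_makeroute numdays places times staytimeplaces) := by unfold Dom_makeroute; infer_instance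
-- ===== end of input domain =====

-- B partitions the places into per-day buckets first and sorts each bucket, instead of A's
-- global sort followed by interleaved index assignments; same return value (alternative
-- decomposition, no speed claim).

-- ===== PORT A =====
def makeroute (numdays : Int) (places : List String) (times : List Int) (staytimeplaces : List Int) : List (List String) :=
  let routeString : List String := (PySem.List.pyRange 0 numdays 1).foldl (fun acc _ => acc ++ ["Home-"]) []
  let routeTimes : List String := (PySem.List.pyRange 0 numdays 1).foldl (fun acc _ => acc ++ ["Home-"]) []
  let coll : List (String × Int × Int) :=
    (PySem.List.pyRange 0 (places.length : Int) 1).foldl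
      (fun acc i => acc ++ [(PySem.List.pyGetD places i "", PySem.List.pyGetD times i 0, PySem.List.pyGetD staytimeplaces i 0)]) []
  let coll2 := PySem.List.sorted coll (fun e => e.2.1) false
  let st :=
    (PySem.List.pyRange 0 (coll2.length : Int) 1).foldl
      (fun (st : List String × List String) i =>
        let e := PySem.List.pyGetD coll2 i ("", 0, 0)
        let ind := PySem.Int.floordiv e.2.1 1440
        (PySem.List.pySetD st.1 ind (PySem.List.pyGetD st.1 ind "" ++ e.1 ++ "-"),
         PySem.List.pySetD st.2 ind (PySem.List.pyGetD st.2 ind "" ++ PySem.Int.toStr e.2.1 ++ "-")))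
      (routeString, routeTimes)
  let st2 :=
    (PySem.List.pyRange 0 (st.1.length : Int) 1).foldl
      (fun (st : List String × List String) i =>
        (PySem.List.pySetD st.1 i (PySem.List.pyGetD st.1 i "" ++ "Home"),
         PySem.List.pySetD st.2 i (PySem.List.pyGetD st.2 i "" ++ "Home")))
      st
  [st2.1, st2.2]

-- ===== PORT B =====
def makeroute_alt (numdays : Int) (places : List String) (times : List Int) (staytimeplaces : List Int) : List (List String) :=
  let days0 : List (List (String × Int × Int)) := (PySem.List.pyRange 0 numdays 1).foldl (fun acc _ => acc ++ [[]]) []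
  let days :=
    (PySem.List.pyRange 0 (places.length : Int) 1).foldl
      (fun ds i =>
        let entry := (PySem.List.pyGetD places i "", PySem.List.pyGetD times i 0, PySem.List.pyGetD staytimeplaces i 0)
        let ind := PySem.Int.floordiv (PySem.List.pyGetD times i 0) 1440
        PySem.List.pySetD ds ind (PySem.List.pyGetD ds ind [] ++ [entry]))
      days0
  let st :=
    days.foldl
      (fun (acc : List String × List String) bucket =>
        let b := PySem.List.sorted bucket (fun e => e.2.1) false
        let p := b.foldl (fun (p : String × String) e => (p.1 ++ e.1 ++ "-", p.2 ++ PySem.Int.toStr e.2.1 ++ "-")) ("Home-", "Home-")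
        (acc.1 ++ [p.1 ++ "Home"], acc.2 ++ [p.2 ++ "Home"]))
      ([], [])
  [st.1, st.2]

-- ===== PRECONDITION & SPEC =====
-- Pre_ excludes exactly the inputs on which A raises IndexError: times or staytimeplaces
-- shorter than places, or a day index times[i]//1440 outside Python's (wrap-around) index
-- range of the numdays-long route lists.  Negative in-range day indices (Python negative-index
-- wrap) are INCLUDED and matched.
def Pre_makeroute (numdays : Int) (places : List String) (times : List Int) (staytimeplaces : List Int) : Prop :=
  places.length ≤ times.length ∧ places.length ≤ staytimeplaces.length ∧
  ∀ t ∈ times.take places.length, PySem.Raise.InRange numdays.toNat (PySem.Int.floordiv t 1440)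
instance (numdays : Int) (places : List String) (times : List Int) (staytimeplaces : List Int) : Decidable (Pre_makeroute numdays places times staytimeplaces) := by unfold Pre_makeroute; infer_instance

def pvWitness_makeroute : Int × List String × List Int × List Int := (2, ["a", "b", "c"], [100, 1500, 60], [5, 5, 5])

def Spec_makeroute (numdays : Int) (places : List String) (times : List Int) (staytimeplaces : List Int) (out : List (List String)) : Prop := out = makeroute_alt numdays places times staytimeplaces
instance (numdays : Int) (places : List String) (times : List Int) (staytimeplaces : List Int) (out : List (List String)) : Decidable (Spec_makeroute numdays places times staytimeplaces out) := by unfold Spec_makeroute; infer_instance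

-- ===== CLAIM (what is proved, stated in full; the proofs are below) =====
def Claim_equal_makeroute : Prop := ∀ (numdays : Int) (places : List String) (times : List Int) (staytimeplaces : List Int), Dom_makeroute numdays places times staytimeplaces → Pre_makeroute numdays places times staytimeplaces → Spec_makeroute numdays places times staytimeplaces (makeroute numdays places times staytimeplaces)

-- ===== LEMMAS AND PROOFS =====

-- Python's effective index into a list of length m (nonneg, or wrap from the end).
def pvEff (m : Nat) (i : Int) : Nat := if 0 ≤ i then i.toNat else m - (-i).toNat

-- the entry list both programs build from the three input lists
def pvEntries (places : List String) (times : List Int) (staytimeplaces : List Int) : List (String × Int × Int) :=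
  (List.range places.length).map (fun k => (places.getD k "", times.getD k 0, staytimeplaces.getD k 0))

def pvDay (e : String × Int × Int) : Int := PySem.Int.floordiv e.2.1 1440

-- the common canonical value of both programs
def pvCanon (numdays : Int) (places : List String) (times : List Int) (staytimeplaces : List Int) : List (List String) :=
  let m := numdays.toNat
  let sc := PySem.List.sorted (pvEntries places times staytimeplaces) (fun e => e.2.1) false
  [(List.range m).map (fun j =>
      (sc.filter (fun e => decide (pvEff m (pvDay e) = j))).foldl (fun s e => s ++ e.1 ++ "-") "Home-" ++ "Home"),
   (List.range m).map (fun j =>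
      (sc.filter (fun e => decide (pvEff m (pvDay e) = j))).foldl (fun s e => s ++ PySem.Int.toStr e.2.1 ++ "-") "Home-" ++ "Home")]

lemma pv_eff_lt {m : Nat} {i : Int} (h : PySem.Raise.InRange m i) : pvEff m i < m := by
  rcases h with ⟨h1, h2⟩
  unfold pvEff
  split <;> omega

lemma pv_pyIdx_eff {m : Nat} {i : Int} (h : PySem.Raise.InRange m i) :
    PySem.List.pyIdx? m i = some (pvEff m i) := by
  rcases h with ⟨h1, h2⟩
  simp only [PySem.List.pyIdx?, pvEff]
  split <;> simp_all

lemma pv_pyGetD_eff {α : Type} {m : Nat} {i : Int} (ds : List α) (d : α)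
    (h : PySem.Raise.InRange m i) (hl : ds.length = m) :
    PySem.List.pyGetD ds i d = ds.getD (pvEff m i) d := by
  subst hl
  have hlt : pvEff ds.length i < ds.length := pv_eff_lt h
  simp [PySem.List.pyGetD, PySem.List.pyGet?, pv_pyIdx_eff h, List.getD, List.getElem?_eq_getElem hlt]

lemma pv_pySetD_eff {α : Type} {m : Nat} {i : Int} (ds : List α) (v : α)
    (h : PySem.Raise.InRange m i) (hl : ds.length = m) :
    PySem.List.pySetD ds i v = ds.set (pvEff m i) v := by
  subst hl
  simp [PySem.List.pySetD, PySem.List.pySet?, pv_pyIdx_eff h]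

lemma pv_foldl_pair {α β γ : Type} (l : List α) (f : β → α → β) (g : γ → α → γ) (p : β × γ) :
    l.foldl (fun st x => (f st.1 x, g st.2 x)) p = (l.foldl f p.1, l.foldl g p.2) := by
  induction l generalizing p with
  | nil => rfl
  | cons x xs ih => simp [List.foldl_cons, ih]

lemma pv_foldl_append {α β : Type} (l : List α) (f : α → β) (acc : List β) :
    l.foldl (fun a x => a ++ [f x]) acc = acc ++ l.map f := by
  induction l generalizing acc with
  | nil => simp
  | cons x xs ih => simp [List.foldl_cons, ih]

lemma pv_getD_range {α : Type} {m : Nat} (ds : List α) (d : α) (hl : ds.length = m) :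
    (List.range m).map (fun j => ds.getD j d) = ds := by
  apply List.ext_getElem <;> simp_all [List.getD]

-- characterisation of a fold that updates slot pvEff(ind e) for each element
lemma pv_char {α β : Type} (g : β → α → β) (ind : α → Int) (d : β) (m : Nat) :
    ∀ (es : List α) (ds : List β), ds.length = m → (∀ e ∈ es, PySem.Raise.InRange m (ind e)) →
    es.foldl (fun ds e => PySem.List.pySetD ds (ind e) (g (PySem.List.pyGetD ds (ind e) d) e)) ds
      = (List.range m).map (fun j => (es.filter (fun e => decide (pvEff m (ind e) = j))).foldl g (ds.getD j d)) := by
  intro es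
  induction es with
  | nil =>
    intro ds hl _
    simp only [List.foldl_nil, List.filter_nil]
    exact (pv_getD_range ds d hl).symm
  | cons e es ih =>
    intro ds hl hin
    have hre : PySem.Raise.InRange m (ind e) := hin e (by simp)
    have hk : pvEff m (ind e) < m := pv_eff_lt hre
    rw [List.foldl_cons, pv_pyGetD_eff ds d hre hl, pv_pySetD_eff ds _ hre hl]
    rw [ih _ (by simp [hl]) (fun x hx => hin x (by simp [hx]))]
    apply List.map_congr_left
    intro j hj
    have hjm : j < m := List.mem_range.mp hj
    rw [List.filter_cons]
    by_cases hc : pvEff m (ind e) = j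
    · subst hc
      rw [if_pos (by simp), List.foldl_cons]
      congr 1
      have hlen : pvEff m (ind e) < ds.length := by omega
      simp [List.getD, hlen]
    · have : (ds.set (pvEff m (ind e)) (g (ds.getD (pvEff m (ind e)) d) e)).getD j d = ds.getD j d := by
        simp [List.getD, List.getElem?_set_ne (by omega : pvEff m (ind e) ≠ j)]
      rw [this]
      simp [hc]

lemma pv_filter_range {m j : Nat} (hj : j < m) :
    (List.range m).filter (fun k => decide (k = j)) = [j] := by
  induction m with
  | zero => omega
  | succ m ih =>
    rw [List.range_succ, List.filter_append]
    by_cases h : j < m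
    · simp [ih h]; omega
    · have : j = m := by omega
      subst this
      have : (List.range j).filter (fun k => decide (k = j)) = [] := by
        apply List.filter_eq_nil_iff.mpr; intro a ha; simp at ha ⊢; omega
      simp [this]

-- ----- stable insertion sort commutes with filter -----

lemma pv_insertBy_front {α : Type} (bf : α → α → Bool) (x : α) (l : List α)
    (h : ∀ z ∈ l, bf x z = true) : PySem.List.insertBy bf x l = x :: l := by
  cases l with
  | nil => rfl
  | cons y ys => simp [PySem.List.insertBy, h y (by simp)]

lemma pv_pairwise_insertBy {α : Type} (key : α → Int) (x : α) (l : List α)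
    (h : l.Pairwise (fun a b => key a ≤ key b)) :
    (PySem.List.insertBy (fun a b => decide (key a < key b)) x l).Pairwise (fun a b => key a ≤ key b) := by
  induction l with
  | nil => simp [PySem.List.insertBy]
  | cons y ys ih =>
    rcases List.pairwise_cons.mp h with ⟨hy, hys⟩
    by_cases hb : key x < key y
    · rw [show PySem.List.insertBy (fun a b => decide (key a < key b)) x (y :: ys) = x :: y :: ys by
        simp [PySem.List.insertBy, hb]]
      refine List.pairwise_cons.mpr ⟨?_, h⟩
      intro z hz
      rcases List.mem_cons.mp hz with rfl | hz
      · exact le_of_lt hb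
      · exact le_trans (le_of_lt hb) (hy z hz)
    · rw [show PySem.List.insertBy (fun a b => decide (key a < key b)) x (y :: ys)
          = y :: PySem.List.insertBy (fun a b => decide (key a < key b)) x ys by
        simp [PySem.List.insertBy, hb]]
      refine List.pairwise_cons.mpr ⟨?_, ih hys⟩
      intro z hz
      rcases (PySem.List.mem_insertBy _ _ _ _).mp hz with rfl | hz
      · exact not_lt.mp hb
      · exact hy z hz

lemma pv_filter_insertBy {α : Type} (key : α → Int) (p : α → Bool) (x : α) (l : List α)
    (h : l.Pairwise (fun a b => key a ≤ key b)) :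
    (PySem.List.insertBy (fun a b => decide (key a < key b)) x l).filter p
      = if p x then PySem.List.insertBy (fun a b => decide (key a < key b)) x (l.filter p) else l.filter p := by
  induction l with
  | nil => by_cases hp : p x <;> simp [PySem.List.insertBy, hp]
  | cons y ys ih =>
    rcases List.pairwise_cons.mp h with ⟨hy, hys⟩
    by_cases hb : key x < key y
    · have hfront : ∀ z ∈ y :: ys, (fun a b => decide (key a < key b)) x z = true := by
        intro z hz
        rcases List.mem_cons.mp hz with rfl | hz
        · simpa using hb
        · simpa using lt_of_lt_of_le hb (hy z hz)
      rw [pv_insertBy_front _ _ _ hfront, List.filter_cons]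
      by_cases hp : p x
      · rw [if_pos hp, if_pos (by simp [hp]), pv_insertBy_front]
        intro z hz
        exact hfront z (List.mem_of_mem_filter hz)
      · rw [if_neg hp, if_neg (by simp [hp])]
    · rw [show PySem.List.insertBy (fun a b => decide (key a < key b)) x (y :: ys)
          = y :: PySem.List.insertBy (fun a b => decide (key a < key b)) x ys by
        simp [PySem.List.insertBy, hb],
        List.filter_cons, ih hys, List.filter_cons]
      by_cases hp : p x <;> by_cases hq : p y <;> simp [hp, hq, PySem.List.insertBy, hb]

lemma pv_sorted_filter {α : Type} (key : α → Int) (p : α → Bool) (xs : List α) :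
    PySem.List.sorted (xs.filter p) key false = (PySem.List.sorted xs key false).filter p := by
  have main : ∀ (xs acc : List α), acc.Pairwise (fun a b => key a ≤ key b) →
      (xs.foldl (fun acc x => PySem.List.insertBy (fun a b => decide (key a < key b)) x acc) acc).filter p
        = (xs.filter p).foldl (fun acc x => PySem.List.insertBy (fun a b => decide (key a < key b)) x acc) (acc.filter p) := by
    intro xs
    induction xs with
    | nil => intro acc h; simp
    | cons x xs ih =>
      intro acc h
      rw [List.foldl_cons, ih _ (pv_pairwise_insertBy key x acc h), pv_filter_insertBy key p x acc h, List.filter_cons]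
      by_cases hp : p x <;> simp [hp]
  rw [PySem.List.sorted_eq_foldl_insertBy, PySem.List.sorted_eq_foldl_insertBy, main xs [] (by simp)]
  simp

lemma pv_init {α : Type} (nd : Int) (c : α) :
    (PySem.List.pyRange 0 nd 1).foldl (fun acc _ => acc ++ [c]) [] = List.replicate nd.toNat c := by
  rw [pv_foldl_append, List.nil_append]
  refine List.eq_replicate_iff.mpr ⟨?_, by simp⟩
  simp [PySem.List.length_pyRange_one]

lemma pv_range_cast (n : Nat) :
    PySem.List.pyRange 0 (n : Int) 1 = (List.range n).map (fun (k : Nat) => (k : Int)) := by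
  rw [PySem.List.pyRange_one]
  simp only [sub_zero, Int.toNat_natCast, zero_add]

lemma pv_entries_fold (places : List String) (times : List Int) (staytimeplaces : List Int) :
    (PySem.List.pyRange 0 (places.length : Int) 1).foldl
      (fun acc i => acc ++ [(PySem.List.pyGetD places i "", PySem.List.pyGetD times i 0, PySem.List.pyGetD staytimeplaces i 0)]) []
      = pvEntries places times staytimeplaces := by
  rw [pv_range_cast, List.foldl_map]
  simp only [PySem.List.pyGetD_natCast]
  rw [pv_foldl_append]
  rfl

-- ----- A equals the canonical form -----

set_option maxHeartbeats 2000000 in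
lemma pv_makeroute_canon (numdays : Int) (places : List String) (times : List Int) (staytimeplaces : List Int)
    (hp : Pre_makeroute numdays places times staytimeplaces) :
    makeroute numdays places times staytimeplaces = pvCanon numdays places times staytimeplaces := by
  obtain ⟨h1, h2, h3⟩ := hp
  have hIn : ∀ e ∈ pvEntries places times staytimeplaces, PySem.Raise.InRange numdays.toNat (pvDay e) := by
    intro e he
    rcases List.mem_map.mp he with ⟨k, hk, rfl⟩
    have hkn : k < places.length := List.mem_range.mp hk
    have hkt : k < times.length := lt_of_lt_of_le hkn h1
    have hmem : times.getD k 0 ∈ List.take places.length times := by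
      have hlt : k < (List.take places.length times).length := by simp; omega
      have hg : (List.take places.length times)[k] = times[k] := by
        simp [List.getElem_take]
      rw [List.getD_eq_getElem _ _ hkt, ← hg]
      exact List.getElem_mem hlt
    simpa [pvDay] using h3 _ hmem
  simp only [makeroute, pvCanon]
  rw [pv_init]
  rw [pv_entries_fold places times staytimeplaces]
  set m := numdays.toNat with hm
  set sc := PySem.List.sorted (pvEntries places times staytimeplaces) (fun e => e.2.1) false with hsc
  have hInSc : ∀ e ∈ sc, PySem.Raise.InRange m (pvDay e) := by
    intro e he
    exact hIn e ((PySem.List.mem_sorted _ _ _ _).mp he)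
  set r := List.replicate m "Home-" with hr
  have hrl : r.length = m := by simp [hr]
  have h4 :
      List.foldl
        (fun (st : List String × List String) i =>
          (PySem.List.pySetD st.1 (PySem.Int.floordiv (PySem.List.pyGetD sc i ("", 0, 0)).2.1 1440)
            (PySem.List.pyGetD st.1 (PySem.Int.floordiv (PySem.List.pyGetD sc i ("", 0, 0)).2.1 1440) "" ++
              (PySem.List.pyGetD sc i ("", 0, 0)).1 ++ "-"),
           PySem.List.pySetD st.2 (PySem.Int.floordiv (PySem.List.pyGetD sc i ("", 0, 0)).2.1 1440)
            (PySem.List.pyGetD st.2 (PySem.Int.floordiv (PySem.List.pyGetD sc i ("", 0, 0)).2.1 1440) "" ++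
              PySem.Int.toStr (PySem.List.pyGetD sc i ("", 0, 0)).2.1 ++ "-")))
        (r, r) (PySem.List.pyRange 0 (sc.length : Int))
      = List.foldl
          (fun (st : List String × List String) e =>
            (PySem.List.pySetD st.1 (PySem.Int.floordiv e.2.1 1440)
              (PySem.List.pyGetD st.1 (PySem.Int.floordiv e.2.1 1440) "" ++ e.1 ++ "-"),
             PySem.List.pySetD st.2 (PySem.Int.floordiv e.2.1 1440)
              (PySem.List.pyGetD st.2 (PySem.Int.floordiv e.2.1 1440) "" ++ PySem.Int.toStr e.2.1 ++ "-")))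
          (r, r) sc :=
    PySem.List.foldl_pyRange_zero_pyGetD' sc ("", 0, 0)
      (fun (st : List String × List String) e =>
        (PySem.List.pySetD st.1 (PySem.Int.floordiv e.2.1 1440)
          (PySem.List.pyGetD st.1 (PySem.Int.floordiv e.2.1 1440) "" ++ e.1 ++ "-"),
         PySem.List.pySetD st.2 (PySem.Int.floordiv e.2.1 1440)
          (PySem.List.pyGetD st.2 (PySem.Int.floordiv e.2.1 1440) "" ++ PySem.Int.toStr e.2.1 ++ "-")))
      (r, r)
  rw [h4]
  have h5 :
      List.foldl
        (fun (st : List String × List String) e =>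
          (PySem.List.pySetD st.1 (PySem.Int.floordiv e.2.1 1440)
            (PySem.List.pyGetD st.1 (PySem.Int.floordiv e.2.1 1440) "" ++ e.1 ++ "-"),
           PySem.List.pySetD st.2 (PySem.Int.floordiv e.2.1 1440)
            (PySem.List.pyGetD st.2 (PySem.Int.floordiv e.2.1 1440) "" ++ PySem.Int.toStr e.2.1 ++ "-")))
        (r, r) sc
      = (List.foldl (fun ds e => PySem.List.pySetD ds (PySem.Int.floordiv e.2.1 1440)
            (PySem.List.pyGetD ds (PySem.Int.floordiv e.2.1 1440) "" ++ e.1 ++ "-")) r sc,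
         List.foldl (fun ds e => PySem.List.pySetD ds (PySem.Int.floordiv e.2.1 1440)
            (PySem.List.pyGetD ds (PySem.Int.floordiv e.2.1 1440) "" ++ PySem.Int.toStr e.2.1 ++ "-")) r sc) :=
    pv_foldl_pair sc
      (fun ds e => PySem.List.pySetD ds (PySem.Int.floordiv e.2.1 1440)
        (PySem.List.pyGetD ds (PySem.Int.floordiv e.2.1 1440) "" ++ e.1 ++ "-"))
      (fun ds e => PySem.List.pySetD ds (PySem.Int.floordiv e.2.1 1440)
        (PySem.List.pyGetD ds (PySem.Int.floordiv e.2.1 1440) "" ++ PySem.Int.toStr e.2.1 ++ "-"))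
      (r, r)
  rw [h5]
  have h6 :
      List.foldl (fun ds e => PySem.List.pySetD ds (PySem.Int.floordiv e.2.1 1440)
          (PySem.List.pyGetD ds (PySem.Int.floordiv e.2.1 1440) "" ++ e.1 ++ "-")) r sc
      = (List.range m).map (fun j =>
          (sc.filter (fun e => decide (pvEff m (pvDay e) = j))).foldl
            (fun s e => s ++ e.1 ++ "-") (r.getD j "")) :=
    pv_char (fun (s : String) (e : String × Int × Int) => s ++ e.1 ++ "-") pvDay "" m sc r hrl hInSc
  have h7 :
      List.foldl (fun ds e => PySem.List.pySetD ds (PySem.Int.floordiv e.2.1 1440)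
          (PySem.List.pyGetD ds (PySem.Int.floordiv e.2.1 1440) "" ++ PySem.Int.toStr e.2.1 ++ "-")) r sc
      = (List.range m).map (fun j =>
          (sc.filter (fun e => decide (pvEff m (pvDay e) = j))).foldl
            (fun s e => s ++ PySem.Int.toStr e.2.1 ++ "-") (r.getD j "")) :=
    pv_char (fun (s : String) (e : String × Int × Int) => s ++ PySem.Int.toStr e.2.1 ++ "-") pvDay "" m sc r hrl hInSc
  rw [h6, h7]
  set RS := List.map (fun j => List.foldl (fun s e => s ++ e.1 ++ "-") (r.getD j "")
      (List.filter (fun e => decide (pvEff m (pvDay e) = j)) sc)) (List.range m) with hRS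
  set RT := List.map (fun j => List.foldl (fun s e => s ++ PySem.Int.toStr e.2.1 ++ "-") (r.getD j "")
      (List.filter (fun e => decide (pvEff m (pvDay e) = j)) sc)) (List.range m) with hRT
  rw [(by simp [hRS] : ((RS, RT).1.length) = m)]
  have h9 :
      List.foldl
        (fun (st : List String × List String) i =>
          (PySem.List.pySetD st.1 i (PySem.List.pyGetD st.1 i "" ++ "Home"),
           PySem.List.pySetD st.2 i (PySem.List.pyGetD st.2 i "" ++ "Home")))
        (RS, RT) (PySem.List.pyRange 0 (m : Int))
      = (List.foldl (fun ds i => PySem.List.pySetD ds i (PySem.List.pyGetD ds i "" ++ "Home")) RS (PySem.List.pyRange 0 (m : Int)),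
         List.foldl (fun ds i => PySem.List.pySetD ds i (PySem.List.pyGetD ds i "" ++ "Home")) RT (PySem.List.pyRange 0 (m : Int))) :=
    pv_foldl_pair (PySem.List.pyRange 0 (m : Int))
      (fun ds i => PySem.List.pySetD ds i (PySem.List.pyGetD ds i "" ++ "Home"))
      (fun ds i => PySem.List.pySetD ds i (PySem.List.pyGetD ds i "" ++ "Home"))
      (RS, RT)
  rw [h9]
  have hmemr : ∀ i ∈ PySem.List.pyRange 0 (m : Int), PySem.Raise.InRange m ((fun (i : Int) => i) i) := by
    intro i hi
    rcases (PySem.List.mem_pyRange_one).mp hi with ⟨hi1, hi2⟩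
    exact ⟨by show -(m:Int) ≤ i; omega, by show i < (m:Int); omega⟩
  have h10 := pv_char (fun (s : String) (_ : Int) => s ++ "Home") (fun (i : Int) => i) "" m
      (PySem.List.pyRange 0 (m : Int)) RS (by simp [hRS]) hmemr
  have h11 := pv_char (fun (s : String) (_ : Int) => s ++ "Home") (fun (i : Int) => i) "" m
      (PySem.List.pyRange 0 (m : Int)) RT (by simp [hRT]) hmemr
  rw [h10, h11]
  have hfilt : ∀ j ∈ List.range m,
      (PySem.List.pyRange 0 (m : Int)).filter (fun i => decide (pvEff m ((fun (i : Int) => i) i) = j)) = [(j : Int)] := by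
    intro j hj
    have hjm : j < m := List.mem_range.mp hj
    rw [pv_range_cast m, List.filter_map]
    have hpred : ((fun i => decide (pvEff m ((fun (i : Int) => i) i) = j)) ∘ (fun (k : Nat) => (k : Int)))
        = (fun k => decide (k = j)) := by
      funext k
      simp [pvEff]
    rw [hpred, pv_filter_range hjm]
    rfl
  congr 1
  · refine List.map_congr_left ?_
    intro j hj
    rw [hfilt j hj, List.foldl_cons, List.foldl_nil]
    have : RS.getD j "" = List.foldl (fun s e => s ++ e.1 ++ "-") "Home-"
        (List.filter (fun e => decide (pvEff m (pvDay e) = j)) sc) := by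
      have hjm : j < m := List.mem_range.mp hj
      simp [hRS, List.getD, hjm, hr]
    rw [this]
  congr 1
  refine List.map_congr_left ?_
  intro j hj
  rw [hfilt j hj, List.foldl_cons, List.foldl_nil]
  have : RT.getD j "" = List.foldl (fun s e => s ++ PySem.Int.toStr e.2.1 ++ "-") "Home-"
      (List.filter (fun e => decide (pvEff m (pvDay e) = j)) sc) := by
    have hjm : j < m := List.mem_range.mp hj
    simp [hRT, List.getD, hjm, hr]
  rw [this]

-- ----- B equals the canonical form -----

lemma pv_makeroute_alt_canon (numdays : Int) (places : List String) (times : List Int) (staytimeplaces : List Int)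
    (hp : Pre_makeroute numdays places times staytimeplaces) :
    makeroute_alt numdays places times staytimeplaces = pvCanon numdays places times staytimeplaces := by
  obtain ⟨h1, h2, h3⟩ := hp
  have hIn : ∀ e ∈ pvEntries places times staytimeplaces, PySem.Raise.InRange numdays.toNat (pvDay e) := by
    intro e he
    rcases List.mem_map.mp he with ⟨k, hk, rfl⟩
    have hkn : k < places.length := List.mem_range.mp hk
    have hkt : k < times.length := lt_of_lt_of_le hkn h1
    have hmem : times.getD k 0 ∈ List.take places.length times := by
      have hlt : k < (List.take places.length times).length := by simp; omega
      have hg : (List.take places.length times)[k] = times[k] := by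
        simp [List.getElem_take]
      rw [List.getD_eq_getElem _ _ hkt, ← hg]
      exact List.getElem_mem hlt
    simpa [pvDay] using h3 _ hmem
  simp only [makeroute_alt, pvCanon]
  rw [pv_init]
  set m := numdays.toNat with hm
  have hpart :
      List.foldl
        (fun (ds : List (List (String × Int × Int))) i =>
          PySem.List.pySetD ds (PySem.Int.floordiv (PySem.List.pyGetD times i 0) 1440)
            (PySem.List.pyGetD ds (PySem.Int.floordiv (PySem.List.pyGetD times i 0) 1440) [] ++
              [(PySem.List.pyGetD places i "", PySem.List.pyGetD times i 0, PySem.List.pyGetD staytimeplaces i 0)]))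
        (List.replicate m []) (PySem.List.pyRange 0 (places.length : Int))
      = List.foldl
          (fun (ds : List (List (String × Int × Int))) e =>
            PySem.List.pySetD ds (pvDay e) (PySem.List.pyGetD ds (pvDay e) [] ++ [e]))
          (List.replicate m []) (pvEntries places times staytimeplaces) := by
    rw [pv_range_cast, List.foldl_map]
    unfold pvEntries
    rw [List.foldl_map]
    simp only [PySem.List.pyGetD_natCast]
    rfl
  rw [hpart]
  have h6b :
      List.foldl
        (fun (ds : List (List (String × Int × Int))) e =>
          PySem.List.pySetD ds (pvDay e) (PySem.List.pyGetD ds (pvDay e) [] ++ [e]))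
        (List.replicate m []) (pvEntries places times staytimeplaces)
      = (List.range m).map (fun j =>
          ((pvEntries places times staytimeplaces).filter (fun e => decide (pvEff m (pvDay e) = j))).foldl
            (fun b e => b ++ [e]) ((List.replicate m ([] : List (String × Int × Int))).getD j [])) :=
    pv_char (fun (b : List (String × Int × Int)) (e : String × Int × Int) => b ++ [e]) pvDay []
      m (pvEntries places times staytimeplaces) (List.replicate m []) (by simp) hIn
  rw [h6b]
  have hsplit : ∀ (bucket : List (String × Int × Int)),
      List.foldl (fun (p : String × String) e => (p.1 ++ e.1 ++ "-", p.2 ++ PySem.Int.toStr e.2.1 ++ "-"))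
        ("Home-", "Home-") (PySem.List.sorted bucket (fun e => e.2.1) false)
      = (List.foldl (fun s e => s ++ e.1 ++ "-") "Home-" (PySem.List.sorted bucket (fun e => e.2.1) false),
         List.foldl (fun s e => s ++ PySem.Int.toStr e.2.1 ++ "-") "Home-" (PySem.List.sorted bucket (fun e => e.2.1) false)) :=
    fun bucket => pv_foldl_pair (PySem.List.sorted bucket (fun e => e.2.1) false)
      (fun s e => s ++ e.1 ++ "-") (fun s e => s ++ PySem.Int.toStr e.2.1 ++ "-") ("Home-", "Home-")
  simp only [hsplit]
  set days := (List.range m).map (fun j =>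
      ((pvEntries places times staytimeplaces).filter (fun e => decide (pvEff m (pvDay e) = j))).foldl
        (fun b e => b ++ [e]) ((List.replicate m ([] : List (String × Int × Int))).getD j [])) with hdays
  have houter :
      List.foldl
        (fun (acc : List String × List String) bucket =>
          (acc.1 ++ [List.foldl (fun s e => s ++ e.1 ++ "-") "Home-" (PySem.List.sorted bucket (fun e => e.2.1) false) ++ "Home"],
           acc.2 ++ [List.foldl (fun s e => s ++ PySem.Int.toStr e.2.1 ++ "-") "Home-" (PySem.List.sorted bucket (fun e => e.2.1) false) ++ "Home"]))
        ([], []) days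
      = (List.foldl (fun a bucket => a ++ [List.foldl (fun s e => s ++ e.1 ++ "-") "Home-" (PySem.List.sorted bucket (fun e => e.2.1) false) ++ "Home"]) [] days,
         List.foldl (fun a bucket => a ++ [List.foldl (fun s e => s ++ PySem.Int.toStr e.2.1 ++ "-") "Home-" (PySem.List.sorted bucket (fun e => e.2.1) false) ++ "Home"]) [] days) :=
    pv_foldl_pair days
      (fun a bucket => a ++ [List.foldl (fun s e => s ++ e.1 ++ "-") "Home-" (PySem.List.sorted bucket (fun e => e.2.1) false) ++ "Home"])
      (fun a bucket => a ++ [List.foldl (fun s e => s ++ PySem.Int.toStr e.2.1 ++ "-") "Home-" (PySem.List.sorted bucket (fun e => e.2.1) false) ++ "Home"])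
      ([], [])
  rw [houter]
  have hmap1 :
      List.foldl (fun a bucket => a ++ [List.foldl (fun s e => s ++ e.1 ++ "-") "Home-" (PySem.List.sorted bucket (fun e => e.2.1) false) ++ "Home"]) [] days
      = [] ++ days.map (fun bucket => List.foldl (fun s e => s ++ e.1 ++ "-") "Home-" (PySem.List.sorted bucket (fun e => e.2.1) false) ++ "Home") :=
    pv_foldl_append days (fun bucket => List.foldl (fun s e => s ++ e.1 ++ "-") "Home-" (PySem.List.sorted bucket (fun e => e.2.1) false) ++ "Home") []
  have hmap2 :
      List.foldl (fun a bucket => a ++ [List.foldl (fun s e => s ++ PySem.Int.toStr e.2.1 ++ "-") "Home-" (PySem.List.sorted bucket (fun e => e.2.1) false) ++ "Home"]) [] days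
      = [] ++ days.map (fun bucket => List.foldl (fun s e => s ++ PySem.Int.toStr e.2.1 ++ "-") "Home-" (PySem.List.sorted bucket (fun e => e.2.1) false) ++ "Home") :=
    pv_foldl_append days (fun bucket => List.foldl (fun s e => s ++ PySem.Int.toStr e.2.1 ++ "-") "Home-" (PySem.List.sorted bucket (fun e => e.2.1) false) ++ "Home") []
  rw [hmap1, hmap2, List.nil_append, List.nil_append, hdays, List.map_map, List.map_map]
  have hbucket : ∀ j ∈ List.range m,
      ((pvEntries places times staytimeplaces).filter (fun e => decide (pvEff m (pvDay e) = j))).foldl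
        (fun b e => b ++ [e]) ((List.replicate m ([] : List (String × Int × Int))).getD j [])
      = (pvEntries places times staytimeplaces).filter (fun e => decide (pvEff m (pvDay e) = j)) := by
    intro j hj
    have hjm : j < m := List.mem_range.mp hj
    have hg : (List.replicate m ([] : List (String × Int × Int))).getD j [] = [] := by
      simp [List.getD, hjm]
    rw [hg]
    have := pv_foldl_append ((pvEntries places times staytimeplaces).filter (fun e => decide (pvEff m (pvDay e) = j)))
      (fun (e : String × Int × Int) => e) []
    simpa using this
  congr 1
  · refine List.map_congr_left ?_
    intro j hj
    simp only [Function.comp]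
    rw [hbucket j hj, pv_sorted_filter]
  congr 1
  refine List.map_congr_left ?_
  intro j hj
  simp only [Function.comp]
  rw [hbucket j hj, pv_sorted_filter]

-- ===== VERDICT (by name: the statement is the Claim_ definition above) =====
theorem makeroute_spec : Claim_equal_makeroute := by
  intro numdays places times staytimeplaces _hd hp
  unfold Spec_makeroute
  rw [pv_makeroute_canon _ _ _ _ hp, pv_makeroute_alt_canon _ _ _ _ hp]
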